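-- pv_equiv track=rewrite | github.com/hjs0522/Algorithm | 이모티콘할인행사.py | solution
-- ===== SOURCE A (Python) =====
-- from itertools import product
--
-- def solution(users, emoticons):
--     answer = [0,0]
--     pro = list(product([10,20,30,40],repeat = len(emoticons)))
--     for p in pro:
--         subscribe= 0
--         cost = 0
--         for user in users:
--             temp = 0
--             for ratio,emoticon in zip(p,emoticons):
--                 if ratio >= user[0]:
--                     temp += emoticon*(100-ratio)//100
--             if temp >= user[1]:
--                 subscribe += 1
--             else:
--                 cost+=temp
--         if subscribe > answer[0]:
--             answer[0] = subscribe
--             answer[1] = cost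
--         elif subscribe == answer[0]:
--             if cost > answer[1]:
--                 answer[1] = cost
--     return answer
-- ===== SOURCE B (Python) =====
-- def solution(users, emoticons):
--     best = (0, 0)
--
--     def evaluate(p):
--         subscribe = 0
--         cost = 0
--         for u in users:
--             t = sum(e * (100 - r) // 100 for r, e in zip(p, emoticons) if r >= u[0])
--             if t >= u[1]:
--                 subscribe += 1
--             else:
--                 cost += t
--         return (subscribe, cost)
--
--     def dfs(i, chosen):
--         nonlocal best
--         if i == len(emoticons):
--             best = max(best, evaluate(chosen))
--             return
--         for r in (10, 20, 30, 40):
--             dfs(i + 1, chosen + (r,))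
--
--     dfs(0, ())
--     return [best[0], best[1]]
-- ===== Notes on version B (the rewrite author's own statement) =====
-- stated objective: alternative
-- what changed: Replaces itertools.product + mutable running-best list with a recursive depth-first backtracking over emoticon indices that builds each ratio tuple incrementally and folds the best (subscribe,cost) pair via tuple max; per-user spend becomes a sum over a filtered zip.
import Mathlib
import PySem

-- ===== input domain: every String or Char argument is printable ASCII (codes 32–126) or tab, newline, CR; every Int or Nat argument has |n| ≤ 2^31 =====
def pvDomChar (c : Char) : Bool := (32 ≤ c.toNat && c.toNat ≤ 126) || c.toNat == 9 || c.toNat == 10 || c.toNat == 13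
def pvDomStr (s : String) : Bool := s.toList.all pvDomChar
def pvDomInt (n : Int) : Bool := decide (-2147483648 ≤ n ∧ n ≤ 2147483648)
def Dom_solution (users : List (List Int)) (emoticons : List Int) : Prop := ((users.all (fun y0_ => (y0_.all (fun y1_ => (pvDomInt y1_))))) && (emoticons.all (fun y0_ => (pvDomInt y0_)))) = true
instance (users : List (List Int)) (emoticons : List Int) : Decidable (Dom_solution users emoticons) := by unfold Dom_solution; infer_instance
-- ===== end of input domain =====

-- B is an alternative decomposition: recursive DFS over emoticon indices with tuple-max folding,
-- instead of A's itertools.product enumeration with a mutable running-best list. Same cost.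

-- ===== PORT A =====

-- itertools.product([10,20,30,40], repeat=n), ported by its documented recurrence
def prodA (n : Nat) : List (List Int) :=
  (List.range n).foldl
    (fun acc _ => acc.flatMap (fun t => [(10:Int),20,30,40].map (fun r => t ++ [r])))
    [[]]

def evalA (users : List (List Int)) (emoticons : List Int) (p : List Int) : Int × Int :=
  users.foldl
    (fun sc u =>
      let temp :=
        (p.zip emoticons).foldl
          (fun t re =>
            if re.1 ≥ PySem.List.pyGetD u 0 0 then
              t + PySem.Int.floordiv (re.2 * (100 - re.1)) 100
            else t) 0
      if temp ≥ PySem.List.pyGetD u 1 0 then (sc.1 + 1, sc.2) else (sc.1, sc.2 + temp))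
    (0, 0)

def solution (users : List (List Int)) (emoticons : List Int) : List Int :=
  let ans :=
    (prodA emoticons.length).foldl
      (fun ans p =>
        let sc := evalA users emoticons p
        if sc.1 > ans.1 then (sc.1, sc.2)
        else if sc.1 = ans.1 then (if sc.2 > ans.2 then (ans.1, sc.2) else ans)
        else ans)
      (0, 0)
  [ans.1, ans.2]

-- ===== PORT B =====

def evalB (users : List (List Int)) (emoticons : List Int) (p : List Int) : Int × Int :=
  users.foldl
    (fun sc u =>
      let t :=
        (((p.zip emoticons).filter (fun re => re.1 ≥ PySem.List.pyGetD u 0 0)).map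
          (fun re => PySem.Int.floordiv (re.2 * (100 - re.1)) 100)).foldl (· + ·) 0
      if t ≥ PySem.List.pyGetD u 1 0 then (sc.1 + 1, sc.2) else (sc.1, sc.2 + t))
    (0, 0)

-- best = max(best, evaluate(chosen))  (Python tuple max: lexicographic, keeps best on ties)
def stepB (best cand : Int × Int) : Int × Int :=
  if best.1 < cand.1 ∨ (best.1 = cand.1 ∧ best.2 < cand.2) then cand else best

def dfsB (users : List (List Int)) (emoticons : List Int) :
    Nat → List Int → Int × Int → Int × Int
  | 0, chosen, best => stepB best (evalB users emoticons chosen)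
  | n + 1, chosen, best =>
      [(10:Int), 20, 30, 40].foldl (fun b r => dfsB users emoticons n (chosen ++ [r]) b) best

def solution_alt (users : List (List Int)) (emoticons : List Int) : List Int :=
  let best := dfsB users emoticons emoticons.length [] (0, 0)
  [best.1, best.2]

-- ===== PRECONDITION & SPEC =====
-- Pre_ excludes exactly the inputs where Python A raises IndexError: some user list
-- has fewer than 2 entries (user[1] is always read; B raises there too).
def Pre_solution (users : List (List Int)) (emoticons : List Int) : Prop :=
  ∀ u ∈ users, 2 ≤ u.length
instance (users : List (List Int)) (emoticons : List Int) : Decidable (Pre_solution users emoticons) := by unfold Pre_solution; infer_instance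

def pvWitness_solution : List (List Int) × List Int := ([[40, 10], [25, 10]], [7000, 12000])

def Spec_solution (users : List (List Int)) (emoticons : List Int) (out : List Int) : Prop := out = solution_alt users emoticons
instance (users : List (List Int)) (emoticons : List Int) (out : List Int) : Decidable (Spec_solution users emoticons out) := by unfold Spec_solution; infer_instance

-- ===== CLAIM (what is proved, stated in full; the proofs are below) =====
def Claim_equal_solution : Prop := ∀ (users : List (List Int)) (emoticons : List Int), Dom_solution users emoticons → Pre_solution users emoticons → Spec_solution users emoticons (solution users emoticons)

-- ===== LEMMAS AND PROOFS =====

-- the leaf tuples reachable from a partial choice `c` with `n` ratios still to pick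
def extT (n : Nat) (c : List Int) : List (List Int) :=
  match n with
  | 0 => [c]
  | n + 1 => [(10:Int), 20, 30, 40].flatMap (fun r => extT n (c ++ [r]))

-- A's running-best update equals Python tuple max
theorem stepA_eq_stepB (b sc : Int × Int) :
    (if sc.1 > b.1 then (sc.1, sc.2)
     else if sc.1 = b.1 then (if sc.2 > b.2 then (b.1, sc.2) else b)
     else b) = stepB b sc := by
  unfold stepB
  obtain ⟨b1, b2⟩ := b; obtain ⟨s1, s2⟩ := sc
  simp only
  split_ifs with h1 h2 h3 h4 h5 h6 <;> simp_all <;> omega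

-- per-user spend: fold-with-if equals fold over filter-map
theorem temp_eq (l : List (Int × Int)) (u0 : Int) (acc : Int) :
    l.foldl (fun t re =>
        if re.1 ≥ u0 then t + PySem.Int.floordiv (re.2 * (100 - re.1)) 100 else t) acc
      = ((l.filter (fun re => re.1 ≥ u0)).map
          (fun re => PySem.Int.floordiv (re.2 * (100 - re.1)) 100)).foldl (· + ·) acc := by
  induction l generalizing acc with
  | nil => rfl
  | cons hd tl ih =>
      simp only [List.foldl_cons, List.filter_cons]
      by_cases h : hd.1 ≥ u0
      · simp only [ge_iff_le] at h ⊢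
        simp only [h, if_true, decide_true, List.map_cons, List.foldl_cons]
        exact ih _
      · simp only [ge_iff_le] at h ⊢
        simp only [h, if_false, decide_false, Bool.false_eq_true]
        exact ih _

theorem evalA_eq_evalB (users : List (List Int)) (emoticons : List Int) (p : List Int) :
    evalA users emoticons p = evalB users emoticons p := by
  unfold evalA evalB
  congr 1
  funext sc u
  simp only [temp_eq]

-- the DFS is the fold of stepB over the leaf tuples
theorem dfsB_eq_foldl (users : List (List Int)) (emoticons : List Int) :
    ∀ (n : Nat) (c : List Int) (best : Int × Int),
      dfsB users emoticons n c best
        = (extT n c).foldl (fun b p => stepB b (evalB users emoticons p)) best := by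
  intro n
  induction n with
  | zero => intro c best; rfl
  | succ n ih =>
      intro c best
      show [(10:Int),20,30,40].foldl (fun b r => dfsB users emoticons n (c ++ [r]) b) best = _
      have key : ∀ (l : List Int) (best : Int × Int),
          l.foldl (fun b r => dfsB users emoticons n (c ++ [r]) b) best
            = (l.flatMap (fun r => extT n (c ++ [r]))).foldl
                (fun b p => stepB b (evalB users emoticons p)) best := by
        intro l
        induction l with
        | nil => intro best; rfl
        | cons hd tl ihl =>
            intro best
            simp only [List.foldl_cons, List.flatMap_cons, List.foldl_append]
            rw [ih, ihl]
      exact key _ best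

-- extT grows by appending a ratio at the END of every tuple
theorem extT_snoc (n : Nat) :
    ∀ c, extT (n + 1) c
        = (extT n c).flatMap (fun t => [(10:Int),20,30,40].map (fun r => t ++ [r])) := by
  induction n with
  | zero => intro c; simp [extT]
  | succ n ih =>
      intro c
      show [(10:Int),20,30,40].flatMap (fun r => extT (n + 1) (c ++ [r]))
          = ([(10:Int),20,30,40].flatMap (fun r => extT n (c ++ [r]))).flatMap
              (fun t => [(10:Int),20,30,40].map (fun r => t ++ [r]))
      rw [congrArg (fun f => List.flatMap f [(10:Int),20,30,40])
            (funext (fun r => ih (c ++ [r])))]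
      rw [List.flatMap_assoc]

theorem prodA_eq_extT (n : Nat) : prodA n = extT n [] := by
  induction n with
  | zero => rfl
  | succ n ih =>
      unfold prodA
      rw [List.range_succ, List.foldl_append]
      show (prodA n).flatMap _ = _
      rw [ih, extT_snoc]

-- ===== VERDICT (by name: the statement is the Claim_ definition above) =====
theorem solution_spec : Claim_equal_solution := by
  intro users emoticons _ _
  unfold Spec_solution solution solution_alt
  rw [dfsB_eq_foldl, ← prodA_eq_extT]
  have hf :
      (fun (ans : Int × Int) (p : List Int) =>
        let sc := evalA users emoticons p
        if sc.1 > ans.1 then (sc.1, sc.2)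
        else if sc.1 = ans.1 then (if sc.2 > ans.2 then (ans.1, sc.2) else ans)
        else ans)
      = (fun (b : Int × Int) (p : List Int) => stepB b (evalB users emoticons p)) := by
    funext b p
    show (if (evalA users emoticons p).1 > b.1 then _ else _) = _
    rw [evalA_eq_evalB]
    exact stepA_eq_stepB b (evalB users emoticons p)
  rw [hf]
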